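-- pv_equiv track=rewrite | github.com/Nil4njana/NLP_Lexical_Substitution | candidate_generation.py | generate_candidate_sentences
-- ===== SOURCE A (Python) =====
-- def reconstruct_sentence(tokens: list) -> str:
--     """
--     Join tokens back into a readable sentence.
--     Punctuation tokens are attached to the preceding token (no leading space).
--     """
--     PUNCT_NO_SPACE_BEFORE = {',', '.', '!', '?', ';', ':', ')', ']', '}'}
--     PUNCT_NO_SPACE_AFTER  = {'(', '[', '{'}
--
--     result = ''
--     for i, tok in enumerate(tokens):
--         if tok in PUNCT_NO_SPACE_BEFORE:
--             result += tok
--         elif i > 0 and tokens[i - 1] in PUNCT_NO_SPACE_AFTER: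
--             result += tok
--         else:
--             result = (result + ' ' + tok) if result else tok
--     return result
--
-- def generate_candidate_sentences(tokens: list, target_index: int,
--                                   candidates: list) -> list:
--     """
--     For every candidate lemma, swap it into the token list at target_index
--     and reconstruct the sentence.
--     Returns list of (lemma, candidate_sentence) tuples.
--     """
--     results = []
--     for cand in candidates:
--         new_tokens = tokens[:]
--         new_tokens[target_index] = cand
--         sentence = reconstruct_sentence(new_tokens)
--         results.append((cand, sentence))
--     return results
-- ===== SOURCE B (Python) =====
-- _BEFORE = {',', '.', '!', '?', ';', ':', ')', ']', '}'}
-- _AFTER = {'(', '[', '{'}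
--
-- def _suffix(rest, prev_open, mid_empty):
--     # Joins 'rest' given whether the preceding token opens a bracket and
--     # whether the sentence built so far is empty.
--     s = ''
--     for tok in rest:
--         if tok in _BEFORE:
--             s = s + tok
--         elif prev_open:
--             s = s + tok
--         elif (not mid_empty) or s:
--             s = s + ' ' + tok
--         else:
--             s = tok
--         prev_open = tok in _AFTER
--     return s
--
-- def generate_candidate_sentences(tokens: list, target_index: int,
--                                   candidates: list) -> list:
--     if not candidates:
--         return []
--     n = len(tokens)
--     i = target_index + n if target_index < 0 else target_index
--     pre_s = _suffix(tokens[:i], False, True)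
--     prev_open = i > 0 and tokens[i - 1] in _AFTER
--     rest = tokens[i + 1:]
--     suf_open = _suffix(rest, True, False)
--     suf_plain = _suffix(rest, False, False)
--     suf_empty = _suffix(rest, False, True)
--     out = []
--     for c in candidates:
--         if c in _BEFORE or prev_open:
--             mid = pre_s + c
--         elif pre_s:
--             mid = pre_s + ' ' + c
--         else:
--             mid = c
--         if c in _AFTER:
--             suf = suf_open
--         elif not mid:
--             suf = suf_empty
--         else:
--             suf = suf_plain
--         out.append((c, mid + suf))
--     return out
-- ===== Notes on version B (the rewrite author's own statement) =====
-- stated objective: faster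
-- what changed: Instead of copying the token list and re-running the full joiner for every candidate, B reconstructs the prefix and the three possible suffix joins once and splices each candidate in O(1) extra scanning work (string building aside).
import Mathlib
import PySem

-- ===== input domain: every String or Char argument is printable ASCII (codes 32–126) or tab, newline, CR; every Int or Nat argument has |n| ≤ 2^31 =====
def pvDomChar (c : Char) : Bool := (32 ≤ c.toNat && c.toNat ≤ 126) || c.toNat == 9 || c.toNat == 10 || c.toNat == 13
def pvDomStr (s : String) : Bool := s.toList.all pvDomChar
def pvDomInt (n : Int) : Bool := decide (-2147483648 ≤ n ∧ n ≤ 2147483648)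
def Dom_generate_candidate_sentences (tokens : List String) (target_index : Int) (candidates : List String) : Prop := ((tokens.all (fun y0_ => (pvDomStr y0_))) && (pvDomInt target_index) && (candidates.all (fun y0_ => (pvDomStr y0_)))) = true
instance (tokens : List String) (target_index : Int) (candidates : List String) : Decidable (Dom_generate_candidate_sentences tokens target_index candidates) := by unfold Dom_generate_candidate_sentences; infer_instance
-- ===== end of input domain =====

-- B precomputes the joined prefix and the three possible suffix joins once and splices each
-- candidate into them, instead of copying the token list and re-joining it for every candidate.
-- Equivalence is about the return value; neither program mutates its arguments.

-- ===== PORT A =====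
-- the two punctuation sets of reconstruct_sentence (shared literal data)
def pvBefore : List String := [",", ".", "!", "?", ";", ":", ")", "]", "}"]
def pvAfter : List String := ["(", "[", "{"]

-- sentence built as List Char (PySem string style); wrapped to String at the end
def reconstruct_sentence (tokens : List String) : String :=
  String.ofList <|
    (PySem.List.enumerate tokens).foldl (fun result p =>
      if pvBefore.contains p.2 then result ++ p.2.toList
      else if p.1 > 0 && pvAfter.contains (PySem.List.pyGetD tokens (p.1 - 1) "") then
        result ++ p.2.toList
      else if result ≠ [] then result ++ ' ' :: p.2.toList
      else p.2.toList) []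

def generate_candidate_sentences (tokens : List String) (target_index : Int) (candidates : List String) : List (String × String) :=
  candidates.foldl (fun results cand =>
    let new_tokens := PySem.List.pySetD tokens target_index cand   -- new_tokens[target_index] = cand (total under Pre_)
    let sentence := reconstruct_sentence new_tokens
    results ++ [(cand, sentence)]) []

-- ===== PORT B =====
-- B's _suffix: prev_open carried along, mid_empty fixed
def pvSuffix (prevOpen : Bool) (midEmpty : Bool) (s : List Char) : List String → List Char
  | [] => s
  | tok :: rest =>
    let s' := if pvBefore.contains tok then s ++ tok.toList
              else if prevOpen then s ++ tok.toList
              else if !midEmpty || s ≠ [] then s ++ ' ' :: tok.toList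
              else tok.toList
    pvSuffix (pvAfter.contains tok) midEmpty s' rest

def generate_candidate_sentences_alt (tokens : List String) (target_index : Int) (candidates : List String) : List (String × String) :=
  if candidates.isEmpty then []
  else
    let n : Int := tokens.length
    let i : Int := if target_index < 0 then target_index + n else target_index
    let preS := pvSuffix false true [] (PySem.List.slice tokens none (some i))
    let prevOpen := decide (0 < i) && pvAfter.contains (PySem.List.pyGetD tokens (i - 1) "")
    let rest := PySem.List.slice tokens (some (i + 1)) none
    let sufOpen := pvSuffix true false [] rest
    let sufPlain := pvSuffix false false [] rest
    let sufEmpty := pvSuffix false true [] rest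
    candidates.map (fun c =>
      let mid := if pvBefore.contains c || prevOpen then preS ++ c.toList
                 else if preS ≠ [] then preS ++ ' ' :: c.toList
                 else c.toList
      let suf := if pvAfter.contains c then sufOpen
                 else if mid = ([] : List Char) then sufEmpty
                 else sufPlain
      (c, String.ofList (mid ++ suf)))

-- ===== PRECONDITION & SPEC =====
-- Pre_ excludes only the inputs on which A raises IndexError: a non-empty candidate list with
-- target_index outside the valid Python index range of tokens.
def Pre_generate_candidate_sentences (tokens : List String) (target_index : Int) (candidates : List String) : Prop :=
  candidates ≠ [] → (-(tokens.length : Int) ≤ target_index ∧ target_index < tokens.length)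
instance (tokens : List String) (target_index : Int) (candidates : List String) : Decidable (Pre_generate_candidate_sentences tokens target_index candidates) := by unfold Pre_generate_candidate_sentences; infer_instance

def pvWitness_generate_candidate_sentences : List String × Int × List String :=
  (["I", "like", "(", "big", ")", "cats", "."], 3, ["small", "furry"])

def Spec_generate_candidate_sentences (tokens : List String) (target_index : Int) (candidates : List String) (out : List (String × String)) : Prop := out = generate_candidate_sentences_alt tokens target_index candidates
instance (tokens : List String) (target_index : Int) (candidates : List String) (out : List (String × String)) : Decidable (Spec_generate_candidate_sentences tokens target_index candidates out) := by unfold Spec_generate_candidate_sentences; infer_instance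

-- ===== CLAIM (what is proved, stated in full; the proofs are below) =====
def Claim_equal_generate_candidate_sentences : Prop := ∀ (tokens : List String) (target_index : Int) (candidates : List String), Dom_generate_candidate_sentences tokens target_index candidates → Pre_generate_candidate_sentences tokens target_index candidates → Spec_generate_candidate_sentences tokens target_index candidates (generate_candidate_sentences tokens target_index candidates)

-- ===== LEMMAS AND PROOFS =====

-- the reference join: prev-open flag and accumulated sentence carried structurally
def pvGo (p : Bool) (acc : List Char) : List String → List Char
  | [] => acc
  | tok :: rest =>
    pvGo (pvAfter.contains tok)
      (if pvBefore.contains tok then acc ++ tok.toList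
       else if p then acc ++ tok.toList
       else if acc ≠ [] then acc ++ ' ' :: tok.toList
       else tok.toList) rest

-- open-bracket state after processing xs, starting from state p
def pvOpenEnd (p : Bool) (xs : List String) : Bool :=
  match xs.getLast? with
  | none => p
  | some t => pvAfter.contains t

theorem pvOpenEnd_append_singleton (p : Bool) (xs : List String) (t : String) :
    pvOpenEnd p (xs ++ [t]) = pvAfter.contains t := by
  simp [pvOpenEnd]

-- tokens[pre.length - 1] is the last element of pre (Python int index, pre nonempty)
theorem pvGetD_pred_length (pre rest : List String) (h : pre ≠ []) :
    PySem.List.pyGetD (pre ++ rest) ((pre.length : Int) - 1) "" = pre.getLast h := by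
  have h1 : 1 ≤ pre.length := List.length_pos_iff.mpr h
  have : ((pre.length : Int) - 1) = ((pre.length - 1 : Nat) : Int) := by omega
  rw [this, PySem.List.pyGetD_natCast]
  have hlt : pre.length - 1 < pre.length := by omega
  rw [List.getD_eq_getElem?_getD, List.getElem?_append_left (by omega)]
  simp [List.getLast_eq_getElem, List.getElem?_eq_getElem hlt]

-- A's enumerated fold over the tail equals pvGo from the state after the prefix
theorem pvFoldA_eq_go (rest : List String) :
    ∀ (pre : List String) (acc : List Char),
    (PySem.List.enumerate rest (pre.length : Int)).foldl (fun result p =>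
      if pvBefore.contains p.2 then result ++ p.2.toList
      else if p.1 > 0 && pvAfter.contains (PySem.List.pyGetD (pre ++ rest) (p.1 - 1) "") then
        result ++ p.2.toList
      else if result ≠ [] then result ++ ' ' :: p.2.toList
      else p.2.toList) acc = pvGo (pvOpenEnd false pre) acc rest := by
  induction rest with
  | nil => intro pre acc; simp [PySem.List.enumerate, pvGo]
  | cons tok rest ih =>
    intro pre acc
    rw [PySem.List.enumerate_cons, List.foldl_cons]
    dsimp only
    have hcond : (decide ((pre.length : Int) > 0) &&
        pvAfter.contains (PySem.List.pyGetD (pre ++ tok :: rest) ((pre.length : Int) - 1) "")) =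
        pvOpenEnd false pre := by
      cases hpre : pre with
      | nil => simp [pvOpenEnd]
      | cons q qs =>
        have hne : pre ≠ [] := by simp [hpre]
        rw [← hpre]
        rw [pvGetD_pred_length pre (tok :: rest) hne]
        have : (0 : Int) < (pre.length : Int) := by
          have := List.length_pos_iff.mpr hne; exact_mod_cast this
        have hlast : pre.getLast? = some (pre.getLast hne) := List.getLast?_eq_some_getLast hne
        simp only [pvOpenEnd, hlast]
        simp only [this, decide_true, Bool.true_and]
    have hstate : ((pre.length : Int) + 1) = (((pre ++ [tok]).length : Nat) : Int) := by
      simp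
    have hlist : pre ++ tok :: rest = (pre ++ [tok]) ++ rest := by simp
    rw [show pvGo (pvOpenEnd false pre) acc (tok :: rest) =
        pvGo (pvOpenEnd false (pre ++ [tok]))
          (if pvBefore.contains tok then acc ++ tok.toList
           else if pvOpenEnd false pre then acc ++ tok.toList
           else if acc ≠ [] then acc ++ ' ' :: tok.toList
           else tok.toList) rest from by rw [pvGo, pvOpenEnd_append_singleton]]
    rw [hstate]
    rw [hcond, hlist]
    exact ih (pre ++ [tok])
      (if pvBefore.contains tok then acc ++ tok.toList
       else if pvOpenEnd false pre then acc ++ tok.toList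
       else if acc ≠ [] then acc ++ ' ' :: tok.toList
       else tok.toList)

theorem reconstruct_eq_go (tokens : List String) :
    (reconstruct_sentence tokens).toList = pvGo false [] tokens := by
  have := pvFoldA_eq_go tokens [] []
  simpa [reconstruct_sentence, pvOpenEnd] using this

theorem pvGo_append (xs : List String) :
    ∀ (p : Bool) (acc : List Char) (ys : List String),
    pvGo p acc (xs ++ ys) = pvGo (pvOpenEnd p xs) (pvGo p acc xs) ys := by
  induction xs with
  | nil => intro p acc ys; simp [pvGo, pvOpenEnd]
  | cons tok xs ih =>
    intro p acc ys
    rw [List.cons_append, pvGo, pvGo, ih]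
    congr 1
    cases hxs : xs with
    | nil => simp [pvOpenEnd]
    | cons q qs =>
      subst hxs
      have hlast : (q :: qs).getLast? = some ((q :: qs).getLast (by simp)) :=
        List.getLast?_eq_some_getLast (by simp)
      simp [pvOpenEnd, List.getLast?_cons_cons, hlast]

theorem pvGo_eq_suffix (rest : List String) :
    ∀ (p : Bool) (mid s : List Char),
    pvGo p (mid ++ s) rest = mid ++ pvSuffix p mid.isEmpty s rest := by
  induction rest with
  | nil => intro p mid s; simp [pvGo, pvSuffix]
  | cons tok rest ih =>
    intro p mid s
    rw [pvGo, pvSuffix]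
    by_cases hb : tok ∈ pvBefore
    · simpa [hb] using ih (pvAfter.contains tok) mid (s ++ tok.toList)
    · by_cases hp : p
      · simpa [hb, hp] using ih (pvAfter.contains tok) mid (s ++ tok.toList)
      · simp only [Bool.not_eq_true] at hp
        by_cases hm : mid = []
        · subst hm
          by_cases hs : s = []
          · subst hs; simpa [hb, hp] using ih (pvAfter.contains tok) [] tok.toList
          · simpa [hb, hp, hs] using ih (pvAfter.contains tok) [] (s ++ ' ' :: tok.toList)
        · have hms : mid ++ s ≠ [] := by simp [hm]
          simpa [hb, hp, hm, hms] using ih (pvAfter.contains tok) mid (s ++ ' ' :: tok.toList)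

-- ===== VERDICT (by name: the statement is the Claim_ definition above) =====
-- pySetD with an in-range Python index is List.set at the normalized index
theorem pySetD_neg (xs : List String) (i : Int) (v : String)
    (h : -(xs.length : Int) ≤ i) (h2 : i < 0) :
    PySem.List.pySetD xs i v = xs.set (i + xs.length).toNat v := by
  have hnot : ¬ (0 ≤ i) := by omega
  simp [PySem.List.pySetD, PySem.List.pySet?, PySem.List.pyIdx?, hnot, h]
  congr 1
  omega

theorem pvAfter_toList_ne (c : String) (hc : c ∈ pvAfter) : c.toList ≠ [] := by
  simp [pvAfter] at hc
  rcases hc with h | h | h <;> subst h <;> decide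

theorem generate_candidate_sentences_spec : Claim_equal_generate_candidate_sentences := by
  intro tokens ti cands hdom hpre
  unfold Spec_generate_candidate_sentences
  cases hc : cands with
  | nil => simp [generate_candidate_sentences, generate_candidate_sentences_alt]
  | cons c0 cs =>
  rw [← hc]
  have hcne : cands ≠ [] := by simp [hc]
  obtain ⟨hlo, hhi⟩ := hpre hcne
  have hcempty : cands.isEmpty = false := by simp [hc]
  set iN : Nat := (if ti < 0 then ti + tokens.length else ti).toNat with hiN
  have hi : (if ti < 0 then ti + (tokens.length : Int) else ti) = (iN : Int) := by
    rw [hiN]; split <;> omega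
  have hiNlt : iN < tokens.length := by
    rw [hiN]; split <;> omega
  -- A as a map
  have hA : generate_candidate_sentences tokens ti cands =
      cands.map (fun c => (c, reconstruct_sentence (PySem.List.pySetD tokens ti c))) := by
    dsimp only [generate_candidate_sentences]
    simpa using PySem.List.foldl_append_singleton_eq_map
      (fun c => (c, reconstruct_sentence (PySem.List.pySetD tokens ti c))) cands []
  -- the assignment splits tokens at iN
  have hset : ∀ c, PySem.List.pySetD tokens ti c =
      tokens.take iN ++ c :: tokens.drop (iN + 1) := by
    intro c
    have hs : PySem.List.pySetD tokens ti c = tokens.set iN c := by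
      by_cases hti : ti < 0
      · rw [pySetD_neg tokens ti c hlo hti]
        congr 1
        rw [hiN]; simp [hti]
      · rw [PySem.List.pySetD_of_nonneg tokens c (by omega)]
        congr 1
        rw [hiN]; simp [hti]
    rw [hs, List.set_eq_take_cons_drop c hiNlt]
  -- B's slices
  have hslice1 : PySem.List.slice tokens none (some ((iN : Int))) = tokens.take iN := by
    rw [PySem.List.slice_to tokens (by omega)]; simp
  have hslice2 : PySem.List.slice tokens (some ((iN : Int) + 1)) none = tokens.drop (iN + 1) := by
    have : ((iN : Int) + 1) = ((iN + 1 : Nat) : Int) := by omega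
    rw [this, PySem.List.slice_from tokens (by omega)]; simp
  -- B's prev_open flag is the open-bracket state after the prefix
  have hopen : (decide ((0 : Int) < (iN : Int)) &&
      pvAfter.contains (PySem.List.pyGetD tokens ((iN : Int) - 1) "")) =
      pvOpenEnd false (tokens.take iN) := by
    rcases Nat.eq_zero_or_pos iN with h0 | hpos
    · rw [h0]; simp [pvOpenEnd]
    · have hne : tokens.take iN ≠ [] := by
        simp only [ne_eq, List.take_eq_nil_iff]
        rintro (h0 | hnil)
        · omega
        · rw [hnil] at hiNlt; simp at hiNlt
      have hlen : (tokens.take iN).length = iN := by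
        rw [List.length_take]; omega
      have hdec : tokens = tokens.take iN ++ tokens.drop iN := (List.take_append_drop iN tokens).symm
      have hget : PySem.List.pyGetD tokens ((iN : Int) - 1) "" = (tokens.take iN).getLast hne := by
        conv_lhs => rw [hdec]
        rw [show ((iN : Int) - 1) = (((tokens.take iN).length : Int) - 1) by rw [hlen]]
        exact pvGetD_pred_length (tokens.take iN) (tokens.drop iN) hne
      have hlast : (tokens.take iN).getLast? = some ((tokens.take iN).getLast hne) :=
        List.getLast?_eq_some_getLast hne
      rw [hget]
      simp only [pvOpenEnd, hlast]
      simp [hpos]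
  -- assemble
  rw [hA]
  dsimp only [generate_candidate_sentences_alt]
  rw [if_neg (by simp [hcempty])]
  rw [hi, hslice1, hslice2, hopen]
  apply List.map_congr_left
  intro c _
  -- pointwise: reconstruct of the spliced list equals B's mid ++ suffix
  rw [hset c]
  have hrec : reconstruct_sentence (tokens.take iN ++ c :: tokens.drop (iN + 1)) =
      String.ofList (pvGo false [] (tokens.take iN ++ c :: tokens.drop (iN + 1))) := by
    have := reconstruct_eq_go (tokens.take iN ++ c :: tokens.drop (iN + 1))
    rw [← this]
    simp
  rw [hrec]
  set pre := tokens.take iN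
  set rest := tokens.drop (iN + 1)
  set P := pvGo false [] pre with hP
  have hpre0 : pvSuffix false true [] pre = P := by
    have := pvGo_eq_suffix pre false [] []
    simpa using this.symm
  have hgo : pvGo false [] (pre ++ c :: rest) =
      pvGo (pvOpenEnd false pre) P (c :: rest) := by
    rw [pvGo_append pre false [] (c :: rest)]
  rw [hgo, hpre0]
  set po := pvOpenEnd false pre with hpo
  rw [show pvGo po P (c :: rest) =
      pvGo (pvAfter.contains c)
        (if pvBefore.contains c then P ++ c.toList
         else if po then P ++ c.toList
         else if P ≠ [] then P ++ ' ' :: c.toList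
         else c.toList) rest from rfl]
  set mid : List Char := (if pvBefore.contains c then P ++ c.toList
         else if po then P ++ c.toList
         else if P ≠ [] then P ++ ' ' :: c.toList
         else c.toList) with hmid
  have hsuf : pvGo (pvAfter.contains c) mid rest =
      mid ++ pvSuffix (pvAfter.contains c) mid.isEmpty [] rest := by
    have := pvGo_eq_suffix rest (pvAfter.contains c) mid []
    simpa using this
  rw [hsuf]
  -- match B's branches
  congr 1
  have hmidB : (if pvBefore.contains c || po then P ++ c.toList
      else if P ≠ [] then P ++ ' ' :: c.toList else c.toList) = mid := by
    rw [hmid]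
    by_cases h1 : c ∈ pvBefore
    · simp [h1]
    · by_cases h2 : po <;> simp [h1, h2]
  rw [hmidB]
  congr 1
  by_cases hca : c ∈ pvAfter
  · have hmidne : mid ≠ [] := by
      have := pvAfter_toList_ne c hca
      rw [hmid]
      split_ifs <;> simp [this]
    have hie : mid.isEmpty = false := by simp [hmidne]
    simp [hca, hie]
  · by_cases hm : mid = []
    · simp [hca, hm]
    · have hie : mid.isEmpty = false := by simp [hm]
      simp [hca, hm, hie]
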